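-- pv_equiv track=rewrite | github.com/ANYMS-A/Skeleton_Aware_Networks_for_Deep_Motion_Retargeting | model/skeleton.py | find_pool_seq
-- ===== SOURCE A (Python) =====
-- def find_pool_seq(degree):
--     num_joint = len(degree)
--     seq_list = [[]]
--     for joint_idx in range(1, num_joint):
--         if degree[joint_idx] == 2:
--             seq_list[-1].append(joint_idx)
--         else:
--             seq_list[-1].append(joint_idx)
--             seq_list.append([])
--             continue
--     seq_list = [each for each in seq_list if len(each) != 0]
--     return seq_list
-- ===== SOURCE B (Python) =====
-- def find_pool_seq(degree):
--     n = len(degree)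
--     cuts = [i for i in range(1, n) if degree[i] != 2]
--     start = 1
--     out = []
--     for c in cuts:
--         out.append(list(range(start, c + 1)))
--         start = c + 1
--     if start < n:
--         out.append(list(range(start, n)))
--     return out
-- ===== Notes on version B (the rewrite author's own statement) =====
-- stated objective: alternative
-- what changed: B first collects the cut indices (degree != 2) in one pass, then emits each group as a contiguous range between consecutive cuts, instead of A's element-by-element append-to-last-group accumulation with a final empty-group filter.
import Mathlib
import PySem

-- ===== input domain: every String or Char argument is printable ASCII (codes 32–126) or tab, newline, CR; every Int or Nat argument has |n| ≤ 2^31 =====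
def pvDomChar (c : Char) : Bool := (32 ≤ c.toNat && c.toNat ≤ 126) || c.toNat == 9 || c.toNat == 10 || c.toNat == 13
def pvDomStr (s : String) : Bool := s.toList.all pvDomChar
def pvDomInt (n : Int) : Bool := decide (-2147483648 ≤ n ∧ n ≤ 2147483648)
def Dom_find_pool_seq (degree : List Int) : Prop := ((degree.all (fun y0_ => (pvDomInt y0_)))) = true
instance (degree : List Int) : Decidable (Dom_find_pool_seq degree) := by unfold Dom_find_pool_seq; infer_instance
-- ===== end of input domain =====

-- B groups joint indices by collecting the cut indices first, then slicing ranges between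
-- consecutive cuts — an alternative decomposition of A's accumulate-and-branch loop.

-- ===== PORT A =====
-- seq_list is always nonempty in A, so seq_list[-1].append(i) is rendered as
-- dropLast ++ [getLastD [] ++ [i]] (exact here, since the list is never empty).
def find_pool_seq (degree : List Int) : List (List Int) :=
  let num_joint : Int := degree.length
  let seq_list : List (List Int) := [[]]
  let seq_list := (PySem.List.pyRange 1 num_joint 1).foldl (fun sl i =>
    if PySem.List.pyGetD degree i 0 = 2 then
      sl.dropLast ++ [sl.getLastD [] ++ [i]]
    else
      (sl.dropLast ++ [sl.getLastD [] ++ [i]]) ++ [[]]) seq_list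
  seq_list.filter (fun each => each.length ≠ 0)

-- ===== PORT B =====
def find_pool_seq_alt (degree : List Int) : List (List Int) :=
  let n : Int := degree.length
  let cuts := (PySem.List.pyRange 1 n 1).filter (fun i => PySem.List.pyGetD degree i 0 ≠ 2)
  let p := cuts.foldl
    (fun (st : Int × List (List Int)) c => (c + 1, st.2 ++ [PySem.List.pyRange st.1 (c + 1) 1]))
    (1, [])
  p.2 ++ (if p.1 < n then [PySem.List.pyRange p.1 n 1] else [])

-- ===== PRECONDITION & SPEC =====
def Spec_find_pool_seq (degree : List Int) (out : List (List Int)) : Prop := out = find_pool_seq_alt degree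
instance (degree : List Int) (out : List (List Int)) : Decidable (Spec_find_pool_seq degree out) := by unfold Spec_find_pool_seq; infer_instance

-- ===== CLAIM (what is proved, stated in full; the proofs are below) =====
def Claim_equal_find_pool_seq : Prop := ∀ (degree : List Int), Dom_find_pool_seq degree → Spec_find_pool_seq degree (find_pool_seq degree)

-- ===== LEMMAS AND PROOFS =====

-- Reference run: scan indices s, s+1, … (fuel k ≥ remaining count), pending group `cur`,
-- emit `cur ++ [i]` at each cut index i, and the pending tail at the end if nonempty.
def pvRun (degree : List Int) (n : Int) : Nat → Int → List Int → List (List Int)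
  | 0, _, cur => if cur = [] then [] else [cur]
  | Nat.succ k, s, cur =>
    if s < n then
      if PySem.List.pyGetD degree s 0 = 2 then pvRun degree n k (s + 1) (cur ++ [s])
      else (cur ++ [s]) :: pvRun degree n k (s + 1) []
    else if cur = [] then [] else [cur]

-- A's loop (filtered) from state done ++ [cur] equals filtered done ++ the reference run.
theorem pvA_run (degree : List Int) (n : Int) :
    ∀ (k : Nat) (s : Int) (done : List (List Int)) (cur : List Int), n ≤ s + k →
      ((PySem.List.pyRange s n 1).foldl (fun sl i =>
          if PySem.List.pyGetD degree i 0 = 2 then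
            sl.dropLast ++ [sl.getLastD [] ++ [i]]
          else
            (sl.dropLast ++ [sl.getLastD [] ++ [i]]) ++ [[]]) (done ++ [cur])).filter
          (fun each => each.length ≠ 0)
        = done.filter (fun each => each.length ≠ 0) ++ pvRun degree n k s cur := by
  intro k
  induction k with
  | zero =>
    intro s done cur h
    rw [PySem.List.pyRange_one_eq_nil (by omega)]
    simp only [List.foldl_nil, List.filter_append, pvRun]
    rcases cur with _ | ⟨c, cs⟩ <;> simp
  | succ k ih =>
    intro s done cur h
    by_cases hs : s < n
    · rw [PySem.List.pyRange_one_cons hs]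
      simp only [List.foldl_cons, pvRun, if_pos hs]
      have hdl : (done ++ [cur]).dropLast = done := by simp
      have hgl : (done ++ [cur]).getLastD [] = cur := by simp
      rw [hdl, hgl]
      by_cases hd : PySem.List.pyGetD degree s 0 = 2
      · rw [if_pos hd, if_pos hd, ih (s + 1) done (cur ++ [s]) (by omega)]
      · rw [if_neg hd, if_neg hd, ih (s + 1) (done ++ [cur ++ [s]]) [] (by omega)]
        simp
    · rw [PySem.List.pyRange_one_eq_nil (by omega)]
      simp only [List.foldl_nil, List.filter_append, pvRun, if_neg hs]
      rcases cur with _ | ⟨c, cs⟩ <;> simp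

-- B's cut-fold from (t, acc) equals acc ++ the reference run with pending group range(t, s).
theorem pvB_run (degree : List Int) (n : Int) :
    ∀ (k : Nat) (s t : Int) (acc : List (List Int)), n ≤ s + k → t ≤ s → (t < s → s ≤ n) →
      (((PySem.List.pyRange s n 1).filter
            (fun i => PySem.List.pyGetD degree i 0 ≠ 2)).foldl
          (fun (st : Int × List (List Int)) c =>
            (c + 1, st.2 ++ [PySem.List.pyRange st.1 (c + 1) 1])) (t, acc)).2 ++
        (if (((PySem.List.pyRange s n 1).filter
            (fun i => PySem.List.pyGetD degree i 0 ≠ 2)).foldl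
          (fun (st : Int × List (List Int)) c =>
            (c + 1, st.2 ++ [PySem.List.pyRange st.1 (c + 1) 1])) (t, acc)).1 < n then
          [PySem.List.pyRange (((PySem.List.pyRange s n 1).filter
            (fun i => PySem.List.pyGetD degree i 0 ≠ 2)).foldl
          (fun (st : Int × List (List Int)) c =>
            (c + 1, st.2 ++ [PySem.List.pyRange st.1 (c + 1) 1])) (t, acc)).1 n 1] else [])
        = acc ++ pvRun degree n k s (PySem.List.pyRange t s 1) := by
  intro k
  induction k with
  | zero =>
    intro s t acc h ht hsn
    rw [PySem.List.pyRange_one_eq_nil (show n ≤ s by omega)]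
    simp only [List.filter_nil, List.foldl_nil, pvRun]
    by_cases hts : t < s
    · have : PySem.List.pyRange t s 1 ≠ [] := by
        rw [PySem.List.pyRange_one_cons hts]; simp
      rw [if_neg this, if_pos (by omega)]
      have hsn' : s = n := by omega
      simp [hsn']
    · have hts' : s ≤ t := by omega
      rw [PySem.List.pyRange_one_eq_nil hts']
      simp [show ¬ t < n by omega]
  | succ k ih =>
    intro s t acc h ht hsn
    by_cases hs : s < n
    · rw [PySem.List.pyRange_one_cons hs]
      by_cases hd : PySem.List.pyGetD degree s 0 = 2
      · rw [List.filter_cons_of_neg (by simp [hd])]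
        rw [ih (s + 1) t acc (by omega) (by omega) (fun _ => by omega)]
        have : PySem.List.pyRange t (s + 1) 1 = PySem.List.pyRange t s 1 ++ [s] :=
          PySem.List.pyRange_one_succ_right ht
        simp [pvRun, hs, hd, this]
      · rw [List.filter_cons_of_pos (by simp [hd])]
        simp only [List.foldl_cons]
        rw [ih (s + 1) (s + 1) (acc ++ [PySem.List.pyRange t (s + 1) 1]) (by omega) le_rfl
              (fun hlt => absurd hlt (lt_irrefl _))]
        rw [PySem.List.pyRange_one_eq_nil (le_refl (s + 1))]
        have : PySem.List.pyRange t (s + 1) 1 = PySem.List.pyRange t s 1 ++ [s] :=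
          PySem.List.pyRange_one_succ_right ht
        simp [pvRun, hs, hd, this]
    · rw [PySem.List.pyRange_one_eq_nil (by omega)]
      simp only [List.filter_nil, List.foldl_nil, pvRun, if_neg hs]
      by_cases hts : t < s
      · have hne : PySem.List.pyRange t s 1 ≠ [] := by
          rw [PySem.List.pyRange_one_cons hts]; simp
        have hsn' : s = n := by omega
        rw [if_neg hne, if_pos (by omega)]
        simp [hsn']
      · have hts' : s ≤ t := by omega
        rw [PySem.List.pyRange_one_eq_nil hts']
        simp [show ¬ t < n by omega]

-- ===== VERDICT (by name: the statement is the Claim_ definition above) =====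
theorem find_pool_seq_spec : Claim_equal_find_pool_seq := by
  intro degree _
  unfold Spec_find_pool_seq find_pool_seq find_pool_seq_alt
  have hA := pvA_run degree (degree.length : Int) degree.length 1 [] [] (by omega)
  have hB := pvB_run degree (degree.length : Int) degree.length 1 1 [] (by omega) le_rfl
    (fun hlt => absurd hlt (lt_irrefl _))
  rw [PySem.List.pyRange_one_eq_nil le_rfl] at hB
  simp only [List.nil_append] at hA hB
  exact hA.trans hB.symm
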